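-- pv_equiv track=rewrite | github.com/hasankilincce/ASCII-Art-Creator | ascii.py | characterAppoint
-- ===== SOURCE A (Python) =====
-- def characterAppoint(characters, pixelValue, pixels):
--     i = 0
--     while i <= len(characters) - 1:
--         if pixelValue * i <= pixels < pixelValue * (i + 1):
--             character = characters[i]
--             i += 1
--             return character
--
--         else:
--             i += 1
-- ===== SOURCE B (Python) =====
-- def characterAppoint(characters, pixelValue, pixels):
--     if pixelValue <= 0:
--         return None
--     idx = pixels // pixelValue
--     if 0 <= idx < len(characters):
--         return characters[idx]
--     return None
-- ===== Notes on version B (the rewrite author's own statement) =====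
-- stated objective: simpler
-- what changed: Replaces the linear scan over bucket indices with a direct floor-division index computation (pixels // pixelValue) plus a range check; non-positive pixelValue short-circuits to None since every bucket is then empty.
import Mathlib
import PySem

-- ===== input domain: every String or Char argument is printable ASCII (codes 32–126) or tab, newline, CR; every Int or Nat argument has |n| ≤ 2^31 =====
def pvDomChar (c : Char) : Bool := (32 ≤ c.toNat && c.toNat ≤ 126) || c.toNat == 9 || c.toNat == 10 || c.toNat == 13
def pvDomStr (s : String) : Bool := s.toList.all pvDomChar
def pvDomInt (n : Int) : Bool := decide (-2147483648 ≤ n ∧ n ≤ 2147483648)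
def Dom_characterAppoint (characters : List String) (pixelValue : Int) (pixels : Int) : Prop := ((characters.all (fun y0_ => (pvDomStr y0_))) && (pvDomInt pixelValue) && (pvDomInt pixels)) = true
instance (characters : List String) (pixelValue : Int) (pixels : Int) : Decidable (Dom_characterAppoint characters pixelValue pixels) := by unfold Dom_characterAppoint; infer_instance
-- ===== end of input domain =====

-- B replaces A's linear scan over bucket indices with a direct floor-division
-- index computation plus a range check (objective: simpler).


-- ===== PORT A =====
-- the while-loop of A: scan i upward while i <= len(characters) - 1
def characterAppointLoop (characters : List String) (pixelValue : Int) (pixels : Int) (i : Nat) : Option String :=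
  if h : (i : Int) ≤ (characters.length : Int) - 1 then
    if pixelValue * i ≤ pixels ∧ pixels < pixelValue * (i + 1) then
      PySem.List.pyGet? characters (i : Int)
    else
      characterAppointLoop characters pixelValue pixels (i + 1)
  else
    none
termination_by characters.length - i
decreasing_by omega

def characterAppoint (characters : List String) (pixelValue : Int) (pixels : Int) : Option String :=
  characterAppointLoop characters pixelValue pixels 0

-- ===== PORT B =====
def characterAppoint_alt (characters : List String) (pixelValue : Int) (pixels : Int) : Option String :=
  if pixelValue ≤ 0 then none
  else
    let idx := PySem.Int.floordiv pixels pixelValue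
    if 0 ≤ idx ∧ idx < (characters.length : Int) then PySem.List.pyGet? characters idx
    else none

-- ===== PRECONDITION & SPEC =====
def Spec_characterAppoint (characters : List String) (pixelValue : Int) (pixels : Int) (out : Option String) : Prop := out = characterAppoint_alt characters pixelValue pixels
instance (characters : List String) (pixelValue : Int) (pixels : Int) (out : Option String) : Decidable (Spec_characterAppoint characters pixelValue pixels out) := by unfold Spec_characterAppoint; infer_instance

-- ===== CLAIM (what is proved, stated in full; the proofs are below) =====
def Claim_equal_characterAppoint : Prop := ∀ (characters : List String) (pixelValue : Int) (pixels : Int), Dom_characterAppoint characters pixelValue pixels → Spec_characterAppoint characters pixelValue pixels (characterAppoint characters pixelValue pixels)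

-- ===== LEMMAS AND PROOFS =====

-- Characterisation of A's scan: from start index i it finds exactly the bucket
-- pixels // pixelValue, provided pixelValue > 0 and that bucket is in [i, len).
theorem characterAppointLoop_eq (characters : List String) (pixelValue pixels : Int) (i : Nat) :
    characterAppointLoop characters pixelValue pixels i =
      if 0 < pixelValue ∧ (i : Int) ≤ PySem.Int.floordiv pixels pixelValue ∧
          PySem.Int.floordiv pixels pixelValue < (characters.length : Int) then
        PySem.List.pyGet? characters (PySem.Int.floordiv pixels pixelValue)
      else none := by
  fun_induction characterAppointLoop characters pixelValue pixels i with
  | case1 i h hc =>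
    -- hit: bucket condition holds at i
    have hpv : 0 < pixelValue := by
      by_contra hle
      push Not at hle
      have h1 : pixelValue * ((i : Int) + 1) ≤ pixelValue * (i : Int) := by nlinarith
      omega
    have hq : PySem.Int.floordiv pixels pixelValue = (i : Int) := by
      rw [PySem.Int.floordiv_eq_iff_of_pos hpv]
      constructor <;> [linarith [hc.1, mul_comm pixelValue (i : Int)]; linarith [hc.2, mul_comm pixelValue ((i : Int) + 1)]]
    rw [hq]
    simp only [if_pos (show 0 < pixelValue ∧ (i : Int) ≤ (i : Int) ∧ (i : Int) < (characters.length : Int) by exact ⟨hpv, le_refl _, by omega⟩)]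
  | case2 i h hc ih =>
    rw [ih]
    by_cases hpv : 0 < pixelValue
    · have hne : PySem.Int.floordiv pixels pixelValue ≠ (i : Int) := by
        intro hq
        rw [PySem.Int.floordiv_eq_iff_of_pos hpv] at hq
        exact hc ⟨by linarith [hq.1, mul_comm (i : Int) pixelValue],
                  by linarith [hq.2, mul_comm ((i : Int) + 1) pixelValue]⟩
      split_ifs with h1 h2 h2 <;> first
        | rfl
        | (exfalso; push_cast at h1 h2 ⊢; omega)
    · split_ifs with h1 h2 <;> simp_all
  | case3 i h =>
    have : (characters.length : Int) ≤ (i : Int) := by omega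
    split_ifs with h1
    · omega
    · rfl

-- ===== VERDICT (by name: the statement is the Claim_ definition above) =====
theorem characterAppoint_spec : Claim_equal_characterAppoint := by
  intro characters pixelValue pixels _
  unfold Spec_characterAppoint characterAppoint characterAppoint_alt
  rw [characterAppointLoop_eq]
  by_cases hpv : pixelValue ≤ 0
  · rw [if_neg (by rintro ⟨h, _⟩; omega), if_pos hpv]
  · rw [if_neg hpv]
    dsimp only
    push_cast
    split_ifs with h1 h2 <;> first | rfl | (exfalso; omega)
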